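-- pv_equiv track=rewrite | github.com/lmompela/supar_creole | scripts/remove_placeholders.py | is_placeholder_sentence
-- ===== SOURCE A (Python) =====
-- def is_placeholder_sentence(sentence_lines):
--     """
--     Returns True if the sentence appears to be a placeholder, i.e.:
--       - Contains a comment line exactly "# text = ##########"
--       - Contains a token line whose second field is exactly "##########"
--     """
--     found_comment = False
--     found_token = False
--     for line in sentence_lines:
--         line = line.strip()
--         if line.startswith("# text"):
--             # Check if the comment line exactly matches
--             if line == "# text = ##########":
--                 found_comment = True
--         elif line and not line.startswith("#"):
--             # This is a token line; CoNLL token lines are tab-delimited.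
--             fields = line.split("\t")
--             if len(fields) >= 2 and fields[1].strip() == "##########":
--                 found_token = True
--     return found_comment and found_token
-- ===== SOURCE B (Python) =====
-- def _is_marker_token(line):
--     s = line.strip()
--     if not s or s.startswith("#"):
--         return False
--     fields = s.split("\t")
--     return len(fields) >= 2 and fields[1].strip() == "##########"
--
--
-- def is_placeholder_sentence(sentence_lines):
--     found_comment = any(line.strip() == "# text = ##########" for line in sentence_lines)
--     found_token = any(_is_marker_token(line) for line in sentence_lines)
--     return found_comment and found_token
-- ===== Notes on version B (the rewrite author's own statement) =====
-- stated objective: simpler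
-- what changed: Replaced the single flag-accumulating loop with branch nesting by two independent any() passes, one per condition, with the token test factored into a named predicate.
import Mathlib
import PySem

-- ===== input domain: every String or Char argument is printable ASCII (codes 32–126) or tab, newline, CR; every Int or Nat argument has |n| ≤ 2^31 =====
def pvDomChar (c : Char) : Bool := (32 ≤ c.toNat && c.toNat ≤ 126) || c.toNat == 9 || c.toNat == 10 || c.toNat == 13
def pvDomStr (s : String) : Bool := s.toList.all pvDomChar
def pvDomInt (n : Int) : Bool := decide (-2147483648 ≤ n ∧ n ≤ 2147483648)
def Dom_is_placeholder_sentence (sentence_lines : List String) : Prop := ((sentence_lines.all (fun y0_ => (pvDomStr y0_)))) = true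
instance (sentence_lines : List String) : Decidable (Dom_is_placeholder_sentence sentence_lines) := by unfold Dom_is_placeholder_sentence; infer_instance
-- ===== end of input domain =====

-- B replaces A's flag-accumulating loop by two independent any() passes, one per condition (objective: simpler).

-- ===== PORT A =====
-- one loop step of A: state = (found_comment, found_token)
def pvStepA (st : Bool × Bool) (line : String) : Bool × Bool :=
  let line := PySem.Str.strip line
  if PySem.Str.startswith line "# text" then
    if line == "# text = ##########" then (true, st.2) else st
  else if line != "" && !(PySem.Str.startswith line "#") then
    let fields := (PySem.Str.split? line "\t").getD []
    if fields.length ≥ 2 && (PySem.Str.strip (fields.getD 1 "") == "##########") then (st.1, true)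
    else st
  else st

def is_placeholder_sentence (sentence_lines : List String) : Bool :=
  let st := sentence_lines.foldl pvStepA (false, false)
  st.1 && st.2

-- ===== PORT B =====
def pvIsMarkerToken (line : String) : Bool :=
  let s := PySem.Str.strip line
  if s == "" || PySem.Str.startswith s "#" then false
  else
    let fields := (PySem.Str.split? s "\t").getD []
    fields.length ≥ 2 && (PySem.Str.strip (fields.getD 1 "") == "##########")

def is_placeholder_sentence_alt (sentence_lines : List String) : Bool :=
  let found_comment := sentence_lines.any (fun line => PySem.Str.strip line == "# text = ##########")
  let found_token := sentence_lines.any pvIsMarkerToken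
  found_comment && found_token

-- ===== PRECONDITION & SPEC =====
def Spec_is_placeholder_sentence (sentence_lines : List String) (out : Bool) : Prop := out = is_placeholder_sentence_alt sentence_lines
instance (sentence_lines : List String) (out : Bool) : Decidable (Spec_is_placeholder_sentence sentence_lines out) := by unfold Spec_is_placeholder_sentence; infer_instance

-- ===== CLAIM (what is proved, stated in full; the proofs are below) =====
def Claim_equal_is_placeholder_sentence : Prop := ∀ (sentence_lines : List String), Dom_is_placeholder_sentence sentence_lines → Spec_is_placeholder_sentence sentence_lines (is_placeholder_sentence sentence_lines)

-- ===== LEMMAS AND PROOFS =====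

-- a line whose strip starts with "# text" also starts with "#"
theorem pv_sw_hash {s : String} (h : PySem.Str.startswith s "# text" = true) :
    PySem.Str.startswith s "#" = true := by
  simp only [PySem.Str.startswith_eq, PySem.Chars.startswith_iff] at h ⊢
  exact List.IsPrefix.trans (by decide) h

-- A's step updates the two flags independently: comment-flag via the comment test, token-flag via pvIsMarkerToken
theorem pvStepA_eq (st : Bool × Bool) (l : String) :
    pvStepA st l = (st.1 || (PySem.Str.strip l == "# text = ##########"),
                    st.2 || pvIsMarkerToken l) := by
  simp only [pvStepA, pvIsMarkerToken]
  split_ifs with h1 h2 h3 h4 h5 h6 h7 h8 h9 <;> simp_all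
  -- the comment literal does start with '#'
  · exact absurd h3 (by decide)
  -- a stripped "# text…" line is not empty and starts with '#', so the token branch is off
  · have hc : (PySem.Str.strip l == "# text = ##########") = false :=
      beq_eq_false_iff_ne.mpr h2
    simp [hc]
  · exfalso
    have h := pv_sw_hash (s := PySem.Str.strip l) (by
      rw [PySem.Str.startswith_eq, PySem.Str.toList_strip]
      rw [show ("# text".toList : List Char) = ['#', ' ', 't', 'e', 'x', 't'] from by decide]
      exact h1)
    rw [PySem.Str.startswith_eq, PySem.Str.toList_strip,
      show ("#".toList : List Char) = ['#'] from by decide] at h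
    exact absurd h (by simp [h4.2])
  -- a line equal to the comment literal would have made h1 true
  · intro h
    exfalso
    rw [← PySem.Str.toList_strip, h] at h1
    exact absurd h1 (by decide)
  · have hc : (PySem.Str.strip l == "# text = ##########") = false := by
      apply beq_eq_false_iff_ne.mpr
      intro h
      rw [← PySem.Str.toList_strip, h] at h1
      exact absurd h1 (by decide)
    have ht : (decide (2 ≤ ((PySem.Str.split? (PySem.Str.strip l) "\t").getD []).length) &&
        (PySem.Str.strip (((PySem.Str.split? (PySem.Str.strip l) "\t").getD [])[1]?.getD "") ==
          "##########")) = false := by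
      by_cases hl : 2 ≤ ((PySem.Str.split? (PySem.Str.strip l) "\t").getD []).length
      · simp [hl, beq_eq_false_iff_ne.mpr (h6 hl)]
      · simp [hl]
    simp [hc, ht]
  · have hc : (PySem.Str.strip l == "# text = ##########") = false := by
      apply beq_eq_false_iff_ne.mpr
      intro h
      rw [← PySem.Str.toList_strip, h] at h1
      exact absurd h1 (by decide)
    simp [hc]


-- loop invariant: the fold from any start equals the start or-ed with B's two any-passes
theorem pv_fold_eq (ls : List String) (fc ft : Bool) :
    ls.foldl pvStepA (fc, ft) =
      (fc || ls.any (fun line => PySem.Str.strip line == "# text = ##########"),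
       ft || ls.any pvIsMarkerToken) := by
  induction ls generalizing fc ft with
  | nil => simp
  | cons l ls ih =>
    simp only [List.foldl_cons, List.any_cons, pvStepA_eq]
    rw [ih]
    simp [Bool.or_assoc]

-- ===== VERDICT (by name: the statement is the Claim_ definition above) =====
theorem is_placeholder_sentence_spec : Claim_equal_is_placeholder_sentence := by
  intro ls _
  unfold Spec_is_placeholder_sentence is_placeholder_sentence is_placeholder_sentence_alt
  rw [pv_fold_eq]
  simp
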